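-- pv_equiv track=rewrite | github.com/d-flood/paleo-bench | paleo_bench/results.py | _looks_like_error_text
-- ===== SOURCE A (Python) =====
-- from typing import Any
--
-- def _looks_like_error_text(value: Any) -> bool:
--     if not isinstance(value, str):
--         return False
--     text = value.strip().lower()
--     if not text:
--         return False
--     markers = (
--         "error:",
--         "badrequesterror",
--         "anthropicexception",
--         "rate limit",
--         "timeout",
--         "traceback",
--     )
--     return any(marker in text for marker in markers)
-- ===== SOURCE B (Python) =====
-- _MARKERS = (
--     "error:",
--     "badrequesterror",
--     "anthropicexception",
--     "rate limit",
--     "timeout",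
--     "traceback",
-- )
--
-- def _looks_like_error_text(value) -> bool:
--     if not isinstance(value, str):
--         return False
--     text = value.strip().lower()
--     for i in range(len(text)):
--         for marker in _MARKERS:
--             if text.startswith(marker, i):
--                 return True
--     return False
-- ===== Notes on version B (the rewrite author's own statement) =====
-- stated objective: alternative
-- what changed: Replaced six independent substring-containment passes (any(marker in text ...)) with a single left-to-right scan that checks at each position whether any marker starts there, which also makes the empty-text early return unnecessary.
import Mathlib
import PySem

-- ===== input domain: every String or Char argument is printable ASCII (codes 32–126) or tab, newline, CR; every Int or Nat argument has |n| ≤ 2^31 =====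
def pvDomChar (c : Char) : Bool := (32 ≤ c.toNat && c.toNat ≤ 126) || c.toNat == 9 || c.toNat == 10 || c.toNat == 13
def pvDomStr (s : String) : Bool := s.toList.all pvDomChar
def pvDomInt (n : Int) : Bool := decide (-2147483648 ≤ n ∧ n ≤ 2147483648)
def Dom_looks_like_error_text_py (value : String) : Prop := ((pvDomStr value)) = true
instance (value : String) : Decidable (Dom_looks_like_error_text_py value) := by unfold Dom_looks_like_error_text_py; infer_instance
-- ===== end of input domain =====

-- B replaces A's six independent substring-containment passes with one left-to-right scan
-- checking every marker by prefix at each position (objective: alternative; same cost).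

-- the six markers, as char lists (shared literal data, not logic)
def pvMarkers : List (List Char) :=
  ["error:".toList, "badrequesterror".toList, "anthropicexception".toList,
   "rate limit".toList, "timeout".toList, "traceback".toList]

-- ===== PORT A =====
-- text = value.strip().lower(); if not text: return False; return any(marker in text for marker in markers)
def looks_like_error_text_py (value : String) : Bool :=
  let text := PySem.Chars.lower (PySem.Chars.strip value.toList)
  if text = [] then false
  else pvMarkers.any (fun m => PySem.Chars.isIn m text)

-- ===== PORT B =====
-- for i in range(len(text)): for marker in markers: if text.startswith(marker, i): return True
-- ported as structural recursion over the suffixes of text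
def pvScan (text : List Char) : Bool :=
  match text with
  | [] => false
  | c :: rest =>
      pvMarkers.any (fun m => PySem.Chars.startswith (c :: rest) m) || pvScan rest

def looks_like_error_text_py_alt (value : String) : Bool :=
  pvScan (PySem.Chars.lower (PySem.Chars.strip value.toList))

-- ===== PRECONDITION & SPEC =====
def Spec_looks_like_error_text_py (value : String) (out : Bool) : Prop := out = looks_like_error_text_py_alt value
instance (value : String) (out : Bool) : Decidable (Spec_looks_like_error_text_py value out) := by unfold Spec_looks_like_error_text_py; infer_instance

-- ===== CLAIM (what is proved, stated in full; the proofs are below) =====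
def Claim_equal_looks_like_error_text_py : Prop := ∀ (value : String), Dom_looks_like_error_text_py value → Spec_looks_like_error_text_py value (looks_like_error_text_py value)

-- ===== LEMMAS AND PROOFS =====

-- the scan fires iff some marker is a prefix of some suffix (markers are nonempty)
theorem pvScan_iff (t : List Char) :
    pvScan t = true ↔ ∃ m ∈ pvMarkers, ∃ j, m <+: t.drop j := by
  induction t with
  | nil =>
      simp only [pvScan, List.drop_nil]
      constructor
      · intro h; cases h
      · rintro ⟨m, hm, j, hp⟩
        have hne : m ≠ [] := by
          fin_cases hm <;> decide
        exact absurd (List.prefix_nil.mp hp) hne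
  | cons c rest ih =>
      simp only [pvScan, Bool.or_eq_true, List.any_eq_true, PySem.Chars.startswith_iff, ih]
      constructor
      · rintro (⟨m, hm, hp⟩ | ⟨m, hm, j, hp⟩)
        · exact ⟨m, hm, 0, by simpa using hp⟩
        · exact ⟨m, hm, j + 1, by simpa using hp⟩
      · rintro ⟨m, hm, j, hp⟩
        cases j with
        | zero => exact Or.inl ⟨m, hm, by simpa using hp⟩
        | succ j => exact Or.inr ⟨m, hm, j, by simpa using hp⟩

-- ===== VERDICT (by name: the statement is the Claim_ definition above) =====
theorem looks_like_error_text_py_spec : Claim_equal_looks_like_error_text_py := by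
  intro value _
  unfold Spec_looks_like_error_text_py looks_like_error_text_py looks_like_error_text_py_alt
  set t := PySem.Chars.lower (PySem.Chars.strip value.toList) with ht
  by_cases h : t = []
  · simp [h, pvScan]
  · simp only [h, if_false]
    rw [Bool.eq_iff_iff, List.any_eq_true, pvScan_iff]
    constructor
    · rintro ⟨m, hm, hin⟩
      obtain ⟨j, hp⟩ := (PySem.Chars.exists_prefix_drop_iff_isIn m t).mpr hin
      exact ⟨m, hm, j, hp⟩
    · rintro ⟨m, hm, j, hp⟩
      exact ⟨m, hm, (PySem.Chars.exists_prefix_drop_iff_isIn m t).mp ⟨j, hp⟩⟩
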